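-- pv_equiv track=rewrite | github.com/Blaxav/Challenges-algo | AOC2017/Antoine/21.py | divide_pattern_in_squares
-- ===== SOURCE A (Python) =====
-- from math import sqrt
--
-- def divide_pattern_in_squares(pattern: str) -> list:
--     # Cette fonction prend en argument un carré entier et fournit une liste de carré de taille 2 ou 3
--     pattern_length = int(sqrt(len(pattern)))
--     if pattern_length <= 3:
--         return [pattern]
--     else:
--         divided_pattern = []
--         for divider in range(2, 4): # On essaye de diviser par 2 ou 3 uniquement
--             if pattern_length % divider == 0:
--                 for y in range(pattern_length // divider): # On boucle sur les carrés de taille divider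
--                     for x in range(pattern_length // divider):
--                         square = ''
--                         for it in range(divider): # On créé des carrés de taille divider
--                             y_position = (y * divider + it) * pattern_length
--                             x_position = x * divider
--                             square += pattern[y_position + x_position : y_position + x_position + divider]
--
--                         divided_pattern.append(square)
--
--                 return divided_pattern
-- ===== SOURCE B (Python) =====
-- from math import sqrt
--
-- def divide_pattern_in_squares(pattern: str) -> list:
--     side = int(sqrt(len(pattern)))
--     if side <= 3:
--         return [pattern]
--     if side % 2 == 0:
--         d = 2
--     elif side % 3 == 0:
--         d = 3
--     else:
--         return None
--     rows = [pattern[i * side:(i + 1) * side] for i in range(side)]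
--     blocks = side // d
--     squares = [''] * (blocks * blocks)
--     for r in range(side):
--         band = r // d
--         for c in range(blocks):
--             squares[band * blocks + c] += rows[r][c * d:c * d + d]
--     return squares
-- ===== Notes on version B (the rewrite author's own statement) =====
-- stated objective: alternative
-- what changed: A gathers each 2x2/3x3 block separately with nested y/x/it loops slicing the flat string; B splits the string into rows once and makes a single pass over the rows, distributing each row's d-char pieces into pre-created per-block accumulators.
-- outside the precondition, e.g. on divide_pattern_in_squares('aaaaaaaaaaaaaaaaaaaaaaaaa'): A returns None, B returns None
import Mathlib
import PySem

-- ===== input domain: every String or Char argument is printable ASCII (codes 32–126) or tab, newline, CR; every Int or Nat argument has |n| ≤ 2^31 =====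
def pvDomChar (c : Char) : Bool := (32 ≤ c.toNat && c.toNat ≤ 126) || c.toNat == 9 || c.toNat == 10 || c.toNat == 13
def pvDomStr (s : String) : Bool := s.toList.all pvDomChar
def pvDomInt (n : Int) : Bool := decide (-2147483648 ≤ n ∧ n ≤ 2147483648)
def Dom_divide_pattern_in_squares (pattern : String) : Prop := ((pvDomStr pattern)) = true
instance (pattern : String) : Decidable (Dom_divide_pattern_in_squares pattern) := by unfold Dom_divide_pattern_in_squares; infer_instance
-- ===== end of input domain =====

-- B replaces A's per-block gather (nested y/x/it loops slicing the flat string) by a single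
-- distributing scan over the grid rows into pre-created accumulators (objective: alternative).

-- ===== PORT A =====
-- int(sqrt(len(pattern))): floor square root, kernel-transparent (largest k with k*k <= n);
-- exact for every length the domain produces. Used by both ports and by Pre_.
def pvSqrt (n : Nat) : Nat := (List.range (n + 1)).foldl (fun a k => if k * k ≤ n then k else a) 0

-- A's inner y/x/it block-gather loop for one divider (the body A runs when pattern_length % divider == 0).
def pvGatherA (cs : List Char) (n divider : Nat) : List String :=
  (List.range (n / divider)).flatMap (fun y =>
    (List.range (n / divider)).map (fun x =>
      String.ofList ((List.range divider).foldl (fun square it =>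
        square ++ PySem.List.slice cs (some (((y * divider + it) * n + x * divider : Nat) : Int))
                                      (some (((y * divider + it) * n + x * divider + divider : Nat) : Int))) [])))

def divide_pattern_in_squares (pattern : String) : List String :=
  let cs := pattern.toList
  let pattern_length := pvSqrt cs.length
  if pattern_length ≤ 3 then [pattern]
  else if pattern_length % 2 = 0 then pvGatherA cs pattern_length 2
  else if pattern_length % 3 = 0 then pvGatherA cs pattern_length 3
  else []  -- Python A falls off the divider loop and returns None here; excluded by Pre_

-- ===== PORT B =====
-- B's distributing row scan for the chosen divider d.
def pvDistributeB (cs : List Char) (n d : Nat) : List String :=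
  let rows := (List.range n).map (fun i =>
    PySem.List.slice cs (some ((i * n : Nat) : Int)) (some (((i + 1) * n : Nat) : Int)))
  let blocks := n / d
  let squares : List (List Char) := List.replicate (blocks * blocks) []
  let squares := (List.range n).foldl (fun sq r =>
    let band := r / d
    (List.range blocks).foldl (fun sq c =>
      sq.set (band * blocks + c) (sq.getD (band * blocks + c) [] ++
        PySem.List.slice (rows.getD r []) (some ((c * d : Nat) : Int)) (some ((c * d + d : Nat) : Int)))) sq) squares
  squares.map String.ofList

def divide_pattern_in_squares_alt (pattern : String) : List String :=
  let cs := pattern.toList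
  let side := pvSqrt cs.length
  if side ≤ 3 then [pattern]
  else if side % 2 = 0 then pvDistributeB cs side 2
  else if side % 3 = 0 then pvDistributeB cs side 3
  else []  -- Python B returns None here, like A; excluded by Pre_

-- ===== PRECONDITION & SPEC =====
-- Pre_ excludes exactly the patterns whose side length int(sqrt(len)) exceeds 3 and is divisible
-- by neither 2 nor 3: there Python A returns None, which is not a value of the declared list type.
def Pre_divide_pattern_in_squares (pattern : String) : Prop :=
  pvSqrt pattern.toList.length ≤ 3 ∨ pvSqrt pattern.toList.length % 2 = 0 ∨
    pvSqrt pattern.toList.length % 3 = 0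
instance (pattern : String) : Decidable (Pre_divide_pattern_in_squares pattern) := by
  unfold Pre_divide_pattern_in_squares; infer_instance
def pvWitness_divide_pattern_in_squares : String := "abcdefghijklmnop"

def Spec_divide_pattern_in_squares (pattern : String) (out : List String) : Prop := out = divide_pattern_in_squares_alt pattern
instance (pattern : String) (out : List String) : Decidable (Spec_divide_pattern_in_squares pattern out) := by unfold Spec_divide_pattern_in_squares; infer_instance

-- ===== CLAIM (what is proved, stated in full; the proofs are below) =====
def Claim_equal_divide_pattern_in_squares : Prop := ∀ (pattern : String), Dom_divide_pattern_in_squares pattern → Pre_divide_pattern_in_squares pattern → Spec_divide_pattern_in_squares pattern (divide_pattern_in_squares pattern)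

-- ===== LEMMAS AND PROOFS =====

-- the d-character segment of grid row r starting at column xd, as both programs ultimately cut it
def pvSeg (cs : List Char) (n r xd d : Nat) : List Char := (cs.drop (r * n + xd)).take d

-- A's square (y, x), written over pvSeg
def pvBlockA (cs : List Char) (n d y x : Nat) : List Char :=
  (List.range d).foldl (fun s it => s ++ pvSeg cs n (y * d + it) (x * d) d) []

theorem pvGatherA_eq_map (cs : List Char) (n d : Nat) :
    pvGatherA cs n d = (List.range (n / d)).flatMap (fun y =>
      (List.range (n / d)).map (fun x => String.ofList (pvBlockA cs n d y x))) := by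
  unfold pvGatherA pvBlockA pvSeg
  refine congrArg (fun f => List.flatMap f (List.range (n / d))) (funext fun y => ?_)
  refine congrArg (fun f => List.map f (List.range (n / d))) (funext fun x => ?_)
  refine congrArg String.ofList ?_
  refine congrArg (fun f => List.foldl f ([] : List Char) (List.range d)) ?_
  funext s it
  rw [PySem.List.slice_natCast, Nat.add_sub_cancel_left]

-- flatMap of an a×b grid of maps is a single map over range (a*b)
theorem pvFlatMap_grid {α : Type} (a b : Nat) (f : Nat → Nat → α) :
    (List.range a).flatMap (fun y => (List.range b).map (fun x => f y x))
      = (List.range (a * b)).map (fun i => f (i / b) (i % b)) := by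
  induction a with
  | zero => simp
  | succ a ih =>
    rw [List.range_succ, List.flatMap_append, ih, List.flatMap_singleton,
      Nat.succ_mul, List.range_add, List.map_append, List.map_map]
    refine congrArg (_ ++ ·) (List.map_congr_left fun x hx => ?_)
    have hb : x < b := List.mem_range.mp hx
    have h1 : (a * b + x) / b = a := by
      rw [Nat.mul_comm a b, Nat.mul_add_div (by omega), Nat.div_eq_of_lt hb]
      omega
    have h2 : (a * b + x) % b = x := by
      rw [Nat.mul_comm a b, Nat.mul_add_mod, Nat.mod_eq_of_lt hb]
    simp only [Function.comp_apply, h1, h2]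

-- set on a map-over-range list
theorem pvSet_map_range {α : Type} (L j : Nat) (g : Nat → α) (v : α) :
    ((List.range L).map g).set j v = (List.range L).map (fun i => if i = j then v else g i) := by
  apply List.ext_getElem (by simp)
  intro i h1 h2
  simp only [List.getElem_set, List.getElem_map, List.getElem_range]
  by_cases hij : j = i
  · simp [hij]
  · rw [if_neg hij, if_neg (fun h => hij h.symm)]

-- one row's inner fold: distribute f into band 'band' of a map-over-range state
theorem pvRowfold (L blocks band : Nat) (g f : Nat → List Char) (m : Nat)
    (hm : m ≤ blocks) (hL : band * blocks + blocks ≤ L) :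
    (List.range m).foldl (fun sq c =>
        sq.set (band * blocks + c) (sq.getD (band * blocks + c) [] ++ f c))
      ((List.range L).map g)
    = (List.range L).map (fun i =>
        if band * blocks ≤ i ∧ i < band * blocks + m then g i ++ f (i - band * blocks) else g i) := by
  induction m with
  | zero =>
    simp only [List.range_zero, List.foldl_nil]
    refine (List.map_congr_left fun i _ => ?_).symm
    rw [if_neg (by omega)]
  | succ m ih =>
    rw [List.range_succ, List.foldl_append, ih (by omega), List.foldl_cons, List.foldl_nil]
    have hj : band * blocks + m < L := by omega
    rw [PySem.List.getD_map_range _ _ _ _ hj, if_neg (by omega), pvSet_map_range]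
    refine List.map_congr_left fun i hi => ?_
    by_cases hij : i = band * blocks + m
    · subst hij
      rw [if_pos rfl, if_pos (by omega), Nat.add_sub_cancel_left]
    · rw [if_neg hij]
      by_cases hin : band * blocks ≤ i ∧ i < band * blocks + m
      · rw [if_pos hin, if_pos (by omega)]
      · rw [if_neg hin, if_neg (by omega)]

-- partial content of accumulator i after the first m grid rows have been distributed
def pvPart (cs : List Char) (n d blocks m i : Nat) : List Char :=
  (List.range (min d (m - i / blocks * d))).foldl
    (fun s it => s ++ pvSeg cs n (i / blocks * d + it) (i % blocks * d) d) []

-- B's row piece equals the flat-string segment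
theorem pvRowPiece (cs : List Char) (n d r x : Nat) (hr : r < n) (hx : x * d + d ≤ n) :
    PySem.List.slice
        (((List.range n).map (fun i =>
          PySem.List.slice cs (some ((i * n : Nat) : Int)) (some (((i + 1) * n : Nat) : Int)))).getD r [])
        (some ((x * d : Nat) : Int)) (some ((x * d + d : Nat) : Int))
      = pvSeg cs n r (x * d) d := by
  rw [PySem.List.getD_map_range _ _ _ _ hr]
  rw [PySem.List.slice_natCast, PySem.List.slice_natCast, Nat.add_sub_cancel_left]
  have h1 : (r + 1) * n - r * n = n := by rw [Nat.succ_mul]; omega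
  rw [h1, List.drop_take, List.take_take, List.drop_drop, Nat.min_eq_left (by omega)]
  rfl

-- the outer fold over the first m grid rows, in closed form
theorem pvOuter (cs : List Char) (n d : Nat) (hd : 0 < d) (hn : n / d * d = n) (hn0 : 0 < n)
    (m : Nat) (hm : m ≤ n) :
    (List.range m).foldl (fun sq r =>
        (List.range (n / d)).foldl (fun sq c =>
          sq.set (r / d * (n / d) + c) (sq.getD (r / d * (n / d) + c) [] ++
            PySem.List.slice
              (((List.range n).map (fun i =>
                PySem.List.slice cs (some ((i * n : Nat) : Int)) (some (((i + 1) * n : Nat) : Int)))).getD r [])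
              (some ((c * d : Nat) : Int)) (some ((c * d + d : Nat) : Int)))) sq)
      ((List.range (n / d * (n / d))).map (fun _ => []))
    = (List.range (n / d * (n / d))).map (pvPart cs n d (n / d) m) := by
  have hb0 : 0 < n / d := by
    rcases Nat.eq_zero_or_pos (n / d) with h | h
    · rw [h] at hn; omega
    · exact h
  induction m with
  | zero =>
    simp only [List.range_zero, List.foldl_nil]
    refine List.map_congr_left fun i _ => ?_
    simp [pvPart]
  | succ m ih =>
    rw [List.range_succ, List.foldl_append, ih (by omega), List.foldl_cons, List.foldl_nil]
    have hband : m / d < n / d := by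
      rw [Nat.div_lt_iff_lt_mul hd]; omega
    have hL : m / d * (n / d) + n / d ≤ n / d * (n / d) := by
      have h := Nat.mul_le_mul_right (n / d) (show m / d + 1 ≤ n / d by omega)
      rw [Nat.add_mul, Nat.one_mul] at h; exact h
    rw [pvRowfold _ _ _ _ _ _ (Nat.le_refl _) hL]
    refine List.map_congr_left fun i hi => ?_
    have hiL : i < n / d * (n / d) := List.mem_range.mp hi
    have hidiv : i / (n / d) * (n / d) + i % (n / d) = i := by
      have h := Nat.div_add_mod i (n / d); rw [Nat.mul_comm] at h; omega
    have himod : i % (n / d) < n / d := Nat.mod_lt _ hb0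
    have hidlt : i / (n / d) < n / d := by
      rw [Nat.div_lt_iff_lt_mul hb0]; exact hiL
    have hmdm : m / d * d + m % d = m := by
      have h := Nat.div_add_mod m d; rw [Nat.mul_comm] at h; omega
    have hmodd : m % d < d := Nat.mod_lt _ hd
    by_cases hband_eq : i / (n / d) = m / d
    · -- row m lands in this accumulator's band
      have e1 : i / (n / d) * (n / d) = m / d * (n / d) := by rw [hband_eq]
      rw [if_pos (by constructor <;> omega)]
      have hx : i - m / d * (n / d) = i % (n / d) := by omega
      rw [hx, pvRowPiece cs n d m (i % (n / d)) (by omega)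
        (by
          have h := Nat.mul_le_mul_right d (show i % (n / d) + 1 ≤ n / d by omega)
          rw [Nat.add_mul, Nat.one_mul] at h; omega)]
      unfold pvPart
      rw [hband_eq]
      have hc1 : min d (m - m / d * d) = m % d := by omega
      have hc2 : min d (m + 1 - m / d * d) = m % d + 1 := by omega
      rw [hc1, hc2, List.range_succ, List.foldl_append, List.foldl_cons, List.foldl_nil]
      have hrow : m / d * d + m % d = m := hmdm
      rw [hrow]
    · -- row m does not touch this accumulator
      rw [if_neg (by
        intro hcon
        obtain ⟨h1, h2⟩ := hcon
        apply hband_eq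
        rcases Nat.lt_trichotomy (i / (n / d)) (m / d) with h | h | h
        · exfalso
          have hmul := Nat.mul_le_mul_right (n / d) (show i / (n / d) + 1 ≤ m / d by omega)
          rw [Nat.add_mul, Nat.one_mul] at hmul; omega
        · exact h
        · exfalso
          have hmul := Nat.mul_le_mul_right (n / d) (show m / d + 1 ≤ i / (n / d) by omega)
          rw [Nat.add_mul, Nat.one_mul] at hmul; omega)]
      unfold pvPart
      have hcnt : min d (m + 1 - i / (n / d) * d) = min d (m - i / (n / d) * d) := by
        rcases Nat.lt_or_ge (i / (n / d)) (m / d) with h | h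
        · have hmul := Nat.mul_le_mul_right d (show i / (n / d) + 1 ≤ m / d by omega)
          rw [Nat.add_mul, Nat.one_mul] at hmul
          omega
        · have h' : m / d < i / (n / d) := by omega
          have hmul := Nat.mul_le_mul_right d (show m / d + 1 ≤ i / (n / d) by omega)
          rw [Nat.add_mul, Nat.one_mul] at hmul
          omega
      rw [hcnt]

theorem pvCore (cs : List Char) (n d : Nat) (hd : 0 < d) (hn0 : 3 < n) (hdvd : n % d = 0) :
    pvDistributeB cs n d = pvGatherA cs n d := by
  have hn : n / d * d = n := Nat.div_mul_cancel (Nat.dvd_of_mod_eq_zero hdvd)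
  have hb0 : 0 < n / d := by
    rcases Nat.eq_zero_or_pos (n / d) with h | h
    · rw [h] at hn; omega
    · exact h
  unfold pvDistributeB
  simp only []
  rw [show (List.replicate (n / d * (n / d)) ([] : List Char))
      = (List.range (n / d * (n / d))).map (fun _ => []) by
    rw [List.map_const', List.length_range]]
  rw [pvOuter cs n d hd hn (by omega) n (Nat.le_refl n)]
  rw [pvGatherA_eq_map, pvFlatMap_grid, List.map_map]
  refine List.map_congr_left fun i hi => ?_
  have hiL : i < n / d * (n / d) := List.mem_range.mp hi
  have hidlt : i / (n / d) < n / d := by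
    rw [Nat.div_lt_iff_lt_mul hb0]; exact hiL
  simp only [Function.comp_apply]
  congr 1
  unfold pvPart pvBlockA
  have hmin : min d (n - i / (n / d) * d) = d := by
    have h := Nat.mul_le_mul_right d (show i / (n / d) + 1 ≤ n / d by omega)
    rw [Nat.add_mul, Nat.one_mul] at h
    omega
  rw [hmin]

theorem divide_pattern_in_squares_spec : Claim_equal_divide_pattern_in_squares := by
  intro pattern _ hpre
  unfold Pre_divide_pattern_in_squares at hpre
  unfold Spec_divide_pattern_in_squares divide_pattern_in_squares divide_pattern_in_squares_alt
  simp only []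
  by_cases h3 : pvSqrt pattern.toList.length ≤ 3
  · rw [if_pos h3, if_pos h3]
  · rw [if_neg h3, if_neg h3]
    by_cases h2 : pvSqrt pattern.toList.length % 2 = 0
    · rw [if_pos h2, if_pos h2, pvCore _ _ 2 (by omega) (by omega) h2]
    · rw [if_neg h2, if_neg h2]
      by_cases hh3 : pvSqrt pattern.toList.length % 3 = 0
      · rw [if_pos hh3, if_pos hh3, pvCore _ _ 3 (by omega) (by omega) hh3]
      · exact absurd hpre (by omega)
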